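-- pv_equiv track=rewrite | github.com/allispaul/adventofcode | 2015/prob3.py | visit_houses
-- ===== SOURCE A (Python) =====
-- def visit_houses(route):
--     houses_visited = {(0,0)}
--     pos = (0,0)
--     for char in route:
--         if char == "^":
--             pos = (pos[0], pos[1]-1)
--         elif char == ">":
--             pos = (pos[0]+1, pos[1])
--         elif char == "v":
--             pos = (pos[0], pos[1]+1)
--         elif char == "<":
--             pos = (pos[0]-1, pos[1])
--         elif char == "\n":
--             continue
--         else:
--             raise ValueError(f"Unrecognized character {char}")
--         houses_visited.add(pos)
--     return(houses_visited)
-- ===== SOURCE B (Python) =====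
-- def visit_houses(route):
--     def delta(char):
--         if char == "^":
--             return (0, -1)
--         if char == ">":
--             return (1, 0)
--         if char == "v":
--             return (0, 1)
--         if char == "<":
--             return (-1, 0)
--         if char == "\n":
--             return None
--         raise ValueError(f"Unrecognized character {char}")
--
--     def go(s):
--         # returns (houses visited by s starting from the origin, net displacement of s)
--         if len(s) == 0:
--             return ({(0, 0)}, (0, 0))
--         if len(s) == 1:
--             d = delta(s[0])
--             if d is None:
--                 return ({(0, 0)}, (0, 0))
--             return ({(0, 0), d}, d)
--         k = len(s) // 2
--         left_set, (dx, dy) = go(s[:k])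
--         right_set, (ex, ey) = go(s[k:])
--         return (left_set | {(dx + x, dy + y) for (x, y) in right_set},
--                 (dx + ex, dy + ey))
--
--     return go(route)[0]
-- ===== Notes on version B (the rewrite author's own statement) =====
-- stated objective: alternative
-- what changed: B replaces A's sequential walk (mutating a current position and adding to a set per character) by a divide-and-conquer: split the route in half, recursively compute each half's visited set in coordinates relative to its own start together with its net displacement, and combine by translating the right half's set by the left half's displacement and uniting.
import Mathlib
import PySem

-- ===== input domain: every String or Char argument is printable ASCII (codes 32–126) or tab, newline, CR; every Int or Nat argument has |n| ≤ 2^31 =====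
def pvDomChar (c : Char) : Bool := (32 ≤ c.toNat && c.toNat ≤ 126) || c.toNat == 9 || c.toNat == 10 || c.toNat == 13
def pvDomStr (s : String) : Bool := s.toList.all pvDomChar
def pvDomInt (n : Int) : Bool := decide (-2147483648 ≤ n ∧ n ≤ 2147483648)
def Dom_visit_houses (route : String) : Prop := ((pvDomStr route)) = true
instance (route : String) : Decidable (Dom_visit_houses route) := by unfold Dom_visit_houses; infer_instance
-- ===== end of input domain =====

-- B replaces A's sequential walk by divide-and-conquer: each half's visited set is computed
-- recursively in coordinates relative to its own start and the halves are combined by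
-- translating the right set by the left half's net displacement (objective: alternative).

-- ===== PORT A =====
def visit_houses (route : String) : List (Int × Int) :=
  (route.toList.foldl
    (fun (st : PySem.Set (Int × Int) × (Int × Int)) c =>
      if c = '^' then
        let q := (st.2.1, st.2.2 - 1); (PySem.Set.add st.1 q, q)
      else if c = '>' then
        let q := (st.2.1 + 1, st.2.2); (PySem.Set.add st.1 q, q)
      else if c = 'v' then
        let q := (st.2.1, st.2.2 + 1); (PySem.Set.add st.1 q, q)
      else if c = '<' then
        let q := (st.2.1 - 1, st.2.2); (PySem.Set.add st.1 q, q)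
      else
        -- '\n' → continue; any other character raises ValueError (excluded by Pre_)
        st)
    (PySem.Set.ofList [((0 : Int), (0 : Int))], ((0 : Int), (0 : Int)))).1

-- ===== PORT B =====
def pvDelta (c : Char) : Option (Int × Int) :=
  if c = '^' then some (0, -1)
  else if c = '>' then some (1, 0)
  else if c = 'v' then some (0, 1)
  else if c = '<' then some (-1, 0)
  else none  -- '\n' contributes nothing; other characters raise ValueError (outside Pre_)

def pvTr (d p : Int × Int) : Int × Int := (d.1 + p.1, d.2 + p.2)

-- Source B's go: (houses visited starting from the origin, net displacement)
def pvGo : List Char → PySem.Set (Int × Int) × (Int × Int)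
  | [] => (PySem.Set.ofList [((0 : Int), (0 : Int))], (0, 0))
  | [c] =>
      match pvDelta c with
      | none => (PySem.Set.ofList [((0 : Int), (0 : Int))], (0, 0))
      | some d => (PySem.Set.ofList [((0 : Int), (0 : Int)), d], d)
  | a :: b :: rest =>
      let k := (a :: b :: rest).length / 2
      let left := pvGo ((a :: b :: rest).take k)
      let right := pvGo ((a :: b :: rest).drop k)
      (PySem.Set.update left.1 (right.1.map (pvTr left.2)),
       (left.2.1 + right.2.1, left.2.2 + right.2.2))
termination_by l => l.length
decreasing_by
  all_goals simp [List.length_take, List.length_drop]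
  all_goals omega

def visit_houses_alt (route : String) : List (Int × Int) :=
  (pvGo route.toList).1

-- ===== PRECONDITION & SPEC =====
-- Pre_ excludes exactly the routes containing a character other than ^ > v < \n,
-- on which Python A (and Python B) raise ValueError.
def Pre_visit_houses (route : String) : Prop :=
  (route.toList.all (fun c => decide (c ∈ ['^', '>', 'v', '<', '\n']))) = true
instance (route : String) : Decidable (Pre_visit_houses route) := by
  unfold Pre_visit_houses; infer_instance

def pvWitness_visit_houses : String := "^>"

def Spec_visit_houses (route : String) (out : List (Int × Int)) : Prop := out = visit_houses_alt route
instance (route : String) (out : List (Int × Int)) : Decidable (Spec_visit_houses route out) := by unfold Spec_visit_houses; infer_instance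

-- ===== CLAIM (what is proved, stated in full; the proofs are below) =====
def Claim_equal_visit_houses : Prop := ∀ (route : String), Dom_visit_houses route → Pre_visit_houses route → Spec_visit_houses route (visit_houses route)

-- ===== LEMMAS AND PROOFS =====

lemma pvTr_assoc (a b p : Int × Int) : pvTr (pvTr a b) p = pvTr a (pvTr b p) := by
  simp [pvTr, add_assoc]

lemma pvTr_zero_left (p : Int × Int) : pvTr (0, 0) p = p := by simp [pvTr]

lemma pvTr_zero_fun : pvTr (0, 0) = id := funext pvTr_zero_left

lemma pvTr_zero_right (d : Int × Int) : pvTr d (0, 0) = d := by simp [pvTr]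

lemma map_comp_pvTr (a b : Int × Int) (l : List (Int × Int)) :
    List.map (pvTr a ∘ pvTr b) l = List.map (pvTr (pvTr a b)) l := by
  apply List.map_congr_left; intro q _; simp [Function.comp, pvTr_assoc]

-- relative visited-position sequence (position after each move, relative to the start)
-- and net displacement of a character list
def pvRel : List Char → List (Int × Int)
  | [] => []
  | c :: cs =>
      match pvDelta c with
      | none => pvRel cs
      | some d => d :: (pvRel cs).map (pvTr d)

def pvDisp : List Char → Int × Int
  | [] => (0, 0)
  | c :: cs =>
      match pvDelta c with
      | none => pvDisp cs
      | some d => pvTr d (pvDisp cs)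

lemma pvRel_append (x y : List Char) :
    pvRel (x ++ y) = pvRel x ++ (pvRel y).map (pvTr (pvDisp x)) := by
  induction x with
  | nil => simp [pvRel, pvDisp, pvTr_zero_fun]
  | cons c cs ih =>
    cases h : pvDelta c with
    | none => simp [pvRel, pvDisp, h, ih]
    | some d => simp [pvRel, pvDisp, h, ih, List.map_map, map_comp_pvTr]

lemma pvDisp_append (x y : List Char) :
    pvDisp (x ++ y) = pvTr (pvDisp x) (pvDisp y) := by
  induction x with
  | nil => simp [pvDisp, pvTr_zero_left]
  | cons c cs ih =>
    cases h : pvDelta c with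
    | none => simp [pvDisp, h, ih]
    | some d => simp [pvDisp, h, ih, pvTr_assoc]

lemma pvDisp_mem (x : List Char) : pvDisp x ∈ ((0, 0) : Int × Int) :: pvRel x := by
  induction x with
  | nil => simp [pvDisp, pvRel]
  | cons c cs ih =>
    cases h : pvDelta c with
    | none => simpa [pvDisp, pvRel, h] using ih
    | some d =>
      simp only [pvDisp, pvRel, h, List.mem_cons]
      rcases List.mem_cons.mp ih with h0 | hm
      · right; left; rw [h0, pvTr_zero_right]
      · right; right; exact List.mem_map.mpr ⟨_, hm, rfl⟩

lemma map_pvTr_add (d x : Int × Int) (s : PySem.Set (Int × Int)) :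
    (PySem.Set.add s x).map (pvTr d) = PySem.Set.add (s.map (pvTr d)) (pvTr d x) := by
  rw [PySem.Set.add_eq_ite, PySem.Set.add_eq_ite]
  have : pvTr d x ∈ s.map (pvTr d) ↔ x ∈ s := by
    constructor
    · intro h
      rcases List.mem_map.mp h with ⟨y, hy, he⟩
      have : y = x := by
        have := he
        simp [pvTr, Prod.ext_iff] at this ⊢
        omega
      exact this ▸ hy
    · exact fun h => List.mem_map.mpr ⟨x, h, rfl⟩
  by_cases hx : x ∈ s
  · simp [hx, this.mpr hx]
  · simp [hx, (not_iff_not.mpr this).mpr hx]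

lemma map_pvTr_update (d : Int × Int) (l : List (Int × Int)) :
    ∀ (s : PySem.Set (Int × Int)),
    (PySem.Set.update s l).map (pvTr d) = PySem.Set.update (s.map (pvTr d)) (l.map (pvTr d)) := by
  induction l with
  | nil => intro s; simp [PySem.Set.update]
  | cons x xs ih =>
    intro s
    rw [List.map_cons, PySem.Set.update_cons, PySem.Set.update_cons, ih, map_pvTr_add]

lemma map_pvTr_ofList (d : Int × Int) (l : List (Int × Int)) :
    (PySem.Set.ofList l).map (pvTr d) = PySem.Set.ofList (l.map (pvTr d)) := by
  rw [← PySem.Set.update_nil_left, ← PySem.Set.update_nil_left, map_pvTr_update]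
  rfl

lemma update_ofList (s : PySem.Set (Int × Int)) (l : List (Int × Int)) :
    PySem.Set.update s (PySem.Set.ofList l) = PySem.Set.update s l := by
  rw [PySem.Set.update_eq_append_filter, PySem.Set.update_eq_append_filter,
      PySem.Set.ofList_ofList]

-- A's fold, characterized by pvRel / pvDisp
lemma pvFoldA (chars : List Char) :
    ∀ (S : PySem.Set (Int × Int)) (p : Int × Int),
    chars.foldl
      (fun (st : PySem.Set (Int × Int) × (Int × Int)) c =>
        if c = '^' then
          let q := (st.2.1, st.2.2 - 1); (PySem.Set.add st.1 q, q)
        else if c = '>' then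
          let q := (st.2.1 + 1, st.2.2); (PySem.Set.add st.1 q, q)
        else if c = 'v' then
          let q := (st.2.1, st.2.2 + 1); (PySem.Set.add st.1 q, q)
        else if c = '<' then
          let q := (st.2.1 - 1, st.2.2); (PySem.Set.add st.1 q, q)
        else st) (S, p)
    = (PySem.Set.update S ((pvRel chars).map (pvTr p)), pvTr p (pvDisp chars)) := by
  induction chars with
  | nil => intro S p; simp [pvRel, pvDisp, PySem.Set.update, pvTr_zero_right]
  | cons c cs ih =>
    intro S p
    rw [List.foldl_cons]
    by_cases h1 : c = '^'
    · subst h1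
      rw [ih]
      have hp : pvTr p (0, -1) = (p.1, p.2 - 1) := by simp [pvTr, sub_eq_add_neg]
      simp [pvRel, pvDelta, pvDisp, PySem.Set.update_cons, map_comp_pvTr, ← pvTr_assoc, hp]
    by_cases h2 : c = '>'
    · subst h2
      rw [ih]
      have hp : pvTr p (1, 0) = (p.1 + 1, p.2) := by simp [pvTr]
      simp [pvRel, pvDelta, pvDisp, PySem.Set.update_cons, map_comp_pvTr, ← pvTr_assoc, hp]
    by_cases h3 : c = 'v'
    · subst h3
      rw [ih]
      have hp : pvTr p (0, 1) = (p.1, p.2 + 1) := by simp [pvTr]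
      simp [h1, pvRel, pvDelta, pvDisp, PySem.Set.update_cons, map_comp_pvTr, ← pvTr_assoc, hp]
    by_cases h4 : c = '<'
    · subst h4
      rw [ih]
      have hp : pvTr p (-1, 0) = (p.1 - 1, p.2) := by simp [pvTr, sub_eq_add_neg]
      simp [h1, h2, pvRel, pvDelta, pvDisp, PySem.Set.update_cons, map_comp_pvTr, ← pvTr_assoc, hp]
    · have hd : pvDelta c = none := by simp [pvDelta, h1, h2, h3, h4]
      simp only [if_neg h1, if_neg h2, if_neg h3, if_neg h4]
      rw [ih]
      simp [pvRel, pvDisp, hd]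

-- B's recursion, characterized by pvRel / pvDisp
lemma pvGo_eq (l : List Char) :
    pvGo l = (PySem.Set.update (PySem.Set.ofList [((0 : Int), (0 : Int))]) (pvRel l), pvDisp l) := by
  induction l using pvGo.induct with
  | case1 => simp [pvGo, pvRel, pvDisp, PySem.Set.update]
  | case2 c h => simp [pvGo, h, pvRel, pvDisp, PySem.Set.update]
  | case3 c d h =>
      simp only [pvGo, h, pvRel, pvDisp, List.map_nil]
      rw [PySem.Set.update_cons, PySem.Set.update]
      show (_, _) = (List.foldl _ _ [], _)
      rw [List.foldl_nil, ← PySem.Set.ofList_append_singleton, pvTr_zero_right]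
      simp
  | case4 a b rest k ih1 ih2 =>
    have hsplit : (List.take ((a :: b :: rest).length / 2) (a :: b :: rest)) ++
        (List.drop ((a :: b :: rest).length / 2) (a :: b :: rest)) = a :: b :: rest :=
      List.take_append_drop _ _
    simp only [pvGo]
    set t := List.take ((a :: b :: rest).length / 2) (a :: b :: rest) with ht
    set dr := List.drop ((a :: b :: rest).length / 2) (a :: b :: rest) with hdr
    rw [ih1, ih2, ← hsplit, pvRel_append, pvDisp_append, PySem.Set.update_append]
    have hS2 : PySem.Set.update (PySem.Set.ofList [((0 : Int), (0 : Int))]) (pvRel dr)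
        = PySem.Set.ofList (((0 : Int), (0 : Int)) :: pvRel dr) := by
      rw [← PySem.Set.update_nil_left (((0 : Int), (0 : Int)) :: pvRel dr), PySem.Set.update_cons]
      rfl
    have hmem : pvDisp t ∈ PySem.Set.update (PySem.Set.ofList [((0 : Int), (0 : Int))]) (pvRel t) := by
      apply (PySem.Set.mem_update _ _ _).mpr
      rcases List.mem_cons.mp (pvDisp_mem t) with h0 | hm
      · left; rw [h0]; simp [PySem.Set.mem_ofList]
      · right; exact hm
    rw [hS2, map_pvTr_ofList, update_ofList, List.map_cons, pvTr_zero_right,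
        PySem.Set.update_cons, PySem.Set.add_of_mem hmem]
    rfl

-- ===== VERDICT (by name: the statement is the Claim_ definition above) =====
theorem visit_houses_spec : Claim_equal_visit_houses := by
  intro route _ _
  unfold Spec_visit_houses visit_houses visit_houses_alt
  rw [pvFoldA, pvGo_eq, pvTr_zero_fun, List.map_id]
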